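-- pv_equiv track=rewrite | github.com/Hoher2000/-5.0 | 2. Линейный поиск/2.F. Колесо Фортуны/2F.py | max_win
-- ===== SOURCE A (Python) =====
-- def max_win(n, arr, a, b, k):
--
--     def check(n, index, a, b, k):
--         for i in range(a, b + 1, k):
--             if 0 < i % (n * k) - k * index <= k or 0 < i % (n * k) - k * (n - index) <= k:
--                 return True
--         return False
--
--     sectors = sorted([(i, j) for j, i in enumerate(arr)], key=lambda x: -x[0])
--     for i, j in sectors:
--         if check(n, j, a, b, k):
--             return i
-- ===== SOURCE B (Python) =====
-- def max_win(n, arr, a, b, k):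
--     # n sectors of width k on a wheel of circumference n*k; spins land at
--     # a, a+k, ..., b.  Sector j wins on a spin landing in (k*j, k*j+k] or
--     # (k*(n-j), k*(n-j)+k] modulo n*k.  Each sector is tested in O(1) by
--     # inverting that condition, and the best value is kept in one scan.
--     cnt = (b - a) // k + 1              # number of spins
--     if cnt <= 0:
--         return None
--     m = n * k
--
--     def hit(c):
--         # the unique x = a (mod k) inside the window (c, c+k]
--         x = c + (a - c - 1) % k + 1
--         # a spin lands there iff x is a residue of m whose first spin index is in range
--         return 0 <= x < m and ((x - a) // k) % n < cnt
--
--     best = None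
--     for j, v in enumerate(arr):
--         if hit(k * j) or hit(k * (n - j)):
--             if best is None or v > best:
--                 best = v
--     return best
-- ===== Notes on version B (the rewrite author's own statement) =====
-- stated objective: faster
-- what changed: Instead of sorting sectors by value and rescanning the whole range(a,b+1,k) for each sector, B inverts the winning-window condition arithmetically (the unique x = a mod k inside (c, c+k], its validity as a residue of n*k, and its first spin index vs the number of spins) to test each sector in O(1), keeping a running max over one unsorted scan; …
-- outside the precondition, e.g. on max_win(-2, [7, 3], 0, 5, 1): A returns 7, B returns None; on max_win(-2, [7, 3], 5, 0, -1): A returns None, B returns 7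
import Mathlib
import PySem

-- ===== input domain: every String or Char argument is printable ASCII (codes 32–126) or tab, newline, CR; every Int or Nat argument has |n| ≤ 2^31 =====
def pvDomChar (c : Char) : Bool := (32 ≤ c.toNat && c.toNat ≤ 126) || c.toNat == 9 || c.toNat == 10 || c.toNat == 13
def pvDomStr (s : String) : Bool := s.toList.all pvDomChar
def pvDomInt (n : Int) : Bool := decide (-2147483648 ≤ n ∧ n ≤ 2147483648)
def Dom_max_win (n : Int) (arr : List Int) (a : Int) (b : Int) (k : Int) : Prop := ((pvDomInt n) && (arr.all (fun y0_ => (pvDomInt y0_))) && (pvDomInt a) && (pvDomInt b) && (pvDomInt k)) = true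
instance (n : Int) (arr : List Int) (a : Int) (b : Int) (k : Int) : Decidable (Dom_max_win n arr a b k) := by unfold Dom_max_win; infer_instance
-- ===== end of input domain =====

-- B replaces A's per-sector range re-scan over a value-sorted copy of arr by an O(1)
-- window-inversion check per sector plus a single max scan (asymptotically faster on the natural domain n, k >= 1).


-- ===== PORT A =====
-- Python's inner 'check': scan range(a, b+1, k) for a hit on sector 'index'
def pvCheckA (n : Int) (index : Int) (a : Int) (b : Int) (k : Int) : Bool :=
  (PySem.List.pyRange a (b + 1) k).any (fun i =>
    decide (0 < PySem.Int.mod i (n * k) - k * index ∧ PySem.Int.mod i (n * k) - k * index ≤ k) ||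
    decide (0 < PySem.Int.mod i (n * k) - k * (n - index) ∧ PySem.Int.mod i (n * k) - k * (n - index) ≤ k))

def max_win (n : Int) (arr : List Int) (a : Int) (b : Int) (k : Int) : Option Int :=
  let sectors := PySem.List.sorted ((PySem.List.enumerate arr).map (fun p => (p.2, p.1))) (fun x => -x.1)
  (sectors.find? (fun p => pvCheckA n p.2 a b k)).map (fun p => p.1)

-- ===== PORT B =====
-- Source B's hit(c): the unique x = a (mod k) inside (c, c+k] is a residue of n*k
-- whose first spin index is within the cnt spins
def pvHit (c : Int) (aa : Int) (cnt : Int) (n : Int) (k : Int) : Bool :=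
  let x := c + PySem.Int.mod (aa - c - 1) k + 1
  decide (0 ≤ x ∧ x < n * k) &&
    decide (PySem.Int.mod (PySem.Int.floordiv (x - aa) k) n < cnt)

-- Source B's 'if best is None or v > best: best = v'
def pvStep (best : Option Int) (v : Int) : Option Int :=
  match best with
  | none => some v
  | some bv => if v > bv then some v else best

def max_win_alt (n : Int) (arr : List Int) (a : Int) (b : Int) (k : Int) : Option Int :=
  let cnt := PySem.Int.floordiv (b - a) k + 1
  if cnt ≤ 0 then none
  else
    (PySem.List.enumerate arr).foldl
      (fun best p =>
        if pvHit (k * p.1) a cnt n k || pvHit (k * (n - p.1)) a cnt n k then pvStep best p.2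
        else best) none

-- ===== PRECONDITION & SPEC =====
-- Pre_ requires n ≥ 1 sectors with a nonzero step, or an empty spin range (k > 0, b < a):
-- A raises for k = 0 (range ValueError) and for n = 0 with a nonempty range (ZeroDivisionError);
-- for n ≤ 0 with a nonempty spin range A's value is an artefact of Python's sign-dependent %
-- on a meaningless nonpositive circumference, so those inputs are excluded.
def Pre_max_win (n : Int) (arr : List Int) (a : Int) (b : Int) (k : Int) : Prop :=
  (0 < n ∧ k ≠ 0) ∨ (0 < k ∧ b < a)
instance (n : Int) (arr : List Int) (a : Int) (b : Int) (k : Int) : Decidable (Pre_max_win n arr a b k) := by unfold Pre_max_win; infer_instance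

def pvWitness_max_win : Int × List Int × Int × Int × Int := (3, [5, 1, 4], 0, 6, 1)

def Spec_max_win (n : Int) (arr : List Int) (a : Int) (b : Int) (k : Int) (out : Option Int) : Prop := out = max_win_alt n arr a b k
instance (n : Int) (arr : List Int) (a : Int) (b : Int) (k : Int) (out : Option Int) : Decidable (Spec_max_win n arr a b k out) := by unfold Spec_max_win; infer_instance

-- ===== CLAIM (what is proved, stated in full; the proofs are below) =====
def Claim_equal_max_win : Prop := ∀ (n : Int) (arr : List Int) (a : Int) (b : Int) (k : Int), Dom_max_win n arr a b k → Pre_max_win n arr a b k → Spec_max_win n arr a b k (max_win n arr a b k)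

-- ===== LEMMAS AND PROOFS =====

-- the spin range is empty when b < a (k > 0)
theorem pv_range_nil_pos (a b k : Int) (hk : 0 < k) (h : b < a) :
    PySem.List.pyRange a (b + 1) k = [] := by
  have h4 : ¬ a < b + 1 := by omega
  simp [PySem.List.pyRange, hk, h4]

-- spin count of range(a, b+1, k): t is a valid spin index iff a + t*k lands at or before b
theorem pv_cnt_iff (a b k t : Int) (hk : 0 < k) :
    t < PySem.Int.floordiv (b - a) k + 1 ↔ a + t * k ≤ b := by
  have h := PySem.Int.le_floordiv_iff_mul_le (a := b - a) (b := k) (q := t) hk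
  omega

-- Python % is periodic in multiples of the divisor
theorem pv_mod_period (x c m : Int) : PySem.Int.mod (x + c * m) m = PySem.Int.mod x m := by
  simp [PySem.Int.mod]

-- a value already inside the divisor's residue range is its own remainder
theorem pv_mod_self_pos (x m : Int) (h1 : 0 ≤ x) (h2 : x < m) : PySem.Int.mod x m = x := by
  rw [PySem.Int.mod_eq_emod_of_pos (by omega)]
  exact Int.emod_eq_of_lt h1 h2

-- exact division
theorem pv_floordiv_mul_self (w k : Int) (hk : 0 < k) : PySem.Int.floordiv (k * w) k = w := by
  rw [PySem.Int.floordiv_eq_iff_of_pos hk]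
  constructor <;> nlinarith

-- a nonnegative remainder never exceeds a nonnegative dividend
theorem pv_mod_le_self (s t : Int) (hs : 0 ≤ s) (ht : 0 < t) : PySem.Int.mod s t ≤ s := by
  rw [PySem.Int.mod_eq_emod_of_pos ht]
  have h1 := Int.ediv_add_emod s t
  have h2 : 0 ≤ t * (s / t) := mul_nonneg (le_of_lt ht) (Int.ediv_nonneg hs (le_of_lt ht))
  omega

-- Source B's x, as a named value for the proofs
def pvX0 (c : Int) (aa : Int) (k : Int) : Int :=
  c + PySem.Int.mod (aa - c - 1) k + 1

theorem pv_hit_true_iff (c aa cnt n k : Int) :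
    pvHit c aa cnt n k = true ↔
      ((0 ≤ pvX0 c aa k ∧ pvX0 c aa k < n * k) ∧
       PySem.Int.mod (PySem.Int.floordiv (pvX0 c aa k - aa) k) n < cnt) := by
  simp [pvHit, pvX0]

-- x lies in the window (c, c+k]
theorem pv_x0_window (c aa k : Int) (hk : 0 < k) : c < pvX0 c aa k ∧ pvX0 c aa k ≤ c + k := by
  have h0 : 0 ≤ PySem.Int.mod (aa - c - 1) k := PySem.Int.mod_nonneg _ hk
  have h1 : PySem.Int.mod (aa - c - 1) k < k := PySem.Int.mod_lt _ hk
  unfold pvX0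
  omega

-- x is congruent to aa modulo k
theorem pv_x0_dvd (c aa k : Int) : ∃ w, pvX0 c aa k - aa = k * w := by
  have hf := PySem.Int.floordiv_mul_add_mod (aa - c - 1) k
  exact ⟨-PySem.Int.floordiv (aa - c - 1) k, by unfold pvX0; linear_combination hf⟩

-- the heart: A's window scan over the range hits sector window (k*jj, k*jj + k]
-- exactly when B's O(1) inversion check accepts
theorem pv_hit_iff (a b n k jj : Int) (hk : 0 < k) (hn : 0 < n) :
    (∃ i ∈ PySem.List.pyRange a (b + 1) k,
        0 < PySem.Int.mod i (n * k) - k * jj ∧ PySem.Int.mod i (n * k) - k * jj ≤ k) ↔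
      pvHit (k * jj) a (PySem.Int.floordiv (b - a) k + 1) n k = true := by
  have hm : 0 < n * k := mul_pos hn hk
  obtain ⟨w, hw⟩ := pv_x0_dvd (k * jj) a k
  obtain ⟨hx1, hx2⟩ := pv_x0_window (k * jj) a k hk
  have hW : PySem.Int.floordiv (pvX0 (k * jj) a k - a) k = w := by
    rw [hw, pv_floordiv_mul_self w k hk]
  rw [pv_hit_true_iff, hW]
  constructor
  · rintro ⟨i, hi, hw1, hw2⟩
    rw [PySem.List.mem_pyRange_iff_of_pos hk] at hi
    obtain ⟨hai, hib, s, hsk⟩ := hi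
    have hs0 : 0 ≤ s := by nlinarith
    have hq := PySem.Int.floordiv_mul_add_mod i (n * k)
    set q := PySem.Int.floordiv i (n * k) with hqdef
    set r := PySem.Int.mod i (n * k) with hrdef
    -- r is congruent to a modulo k, hence r = x
    have hra : r - a = k * (s - q * n) := by linear_combination hsk + hq
    have hdvd : k ∣ r - pvX0 (k * jj) a k := ⟨s - q * n - w, by linear_combination hra - hw⟩
    have hrx : r = pvX0 (k * jj) a k := by
      have h0 := Int.eq_zero_of_abs_lt_dvd hdvd (by rw [abs_lt]; omega)
      omega
    have hkwk : k * w = k * (s - q * n) := by linear_combination -hw + hra - hrx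
    have hwsq : w = s - q * n := mul_left_cancel₀ (by omega) hkwk
    constructor
    · -- r is a valid residue, and r = x
      rw [← hrx]
      exact ⟨PySem.Int.mod_nonneg i hm, PySem.Int.mod_lt i hm⟩
    · -- the first hitting spin index is within the spin count
      have hsb : s < PySem.Int.floordiv (b - a) k + 1 :=
        (pv_cnt_iff a b k s hk).mpr (by nlinarith)
      have hmod : PySem.Int.mod w n = PySem.Int.mod s n := by
        rw [hwsq, show s - q * n = s + (-q) * n by ring, pv_mod_period]
      rw [hmod]
      calc PySem.Int.mod s n ≤ s := pv_mod_le_self s n hs0 hn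
        _ < _ := hsb
  · rintro ⟨hok, ht⟩
    set x0 := pvX0 (k * jj) a k with hx0def
    set t0 := PySem.Int.mod w n with ht0def
    have ht0 : 0 ≤ t0 := PySem.Int.mod_nonneg w hn
    have hf := PySem.Int.floordiv_mul_add_mod w n
    rw [← ht0def] at hf
    set e := PySem.Int.floordiv w n with hedef
    refine ⟨a + t0 * k, ?_, ?_⟩
    · rw [PySem.List.mem_pyRange_iff_of_pos hk]
      refine ⟨by nlinarith, by have := (pv_cnt_iff a b k t0 hk).mp ht; omega, ⟨t0, by ring⟩⟩
    · -- mod (a + t0*k) (n*k) = x, which sits in the window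
      have hcc : a + t0 * k = x0 + (-e) * (n * k) := by linear_combination -hw + k * hf
      have hx0r : PySem.Int.mod x0 (n * k) = x0 := pv_mod_self_pos x0 (n * k) hok.1 hok.2
      rw [hcc, pv_mod_period, hx0r]
      omega

-- B's accumulator step is a running max
theorem pv_step_max (x v : Int) : pvStep (some x) v = some (max x v) := by
  show (if v > x then some v else some x) = some (max x v)
  rcases (by omega : v ≤ x ∨ x < v) with h | h
  · rw [if_neg (by omega), max_eq_left h]
  · rw [if_pos (by omega), max_eq_right h.le]

theorem pv_foldl_step_some (t : List Int) (x : Int) :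
    t.foldl pvStep (some x) = some (t.foldl max x) := by
  induction t generalizing x with
  | nil => rfl
  | cons h t ih => rw [List.foldl_cons, pv_step_max, List.foldl_cons, ih]

-- the whole value fold is Python's max() of the list
theorem pv_foldl_step_eq_max? (V : List Int) :
    V.foldl pvStep none = PySem.List.max? V (fun y => y) := by
  cases V with
  | nil => rfl
  | cons v t => rw [List.foldl_cons, PySem.List.max?_id_cons]; exact pv_foldl_step_some t v

-- head of a value-descending pairwise list has the max first component
theorem pv_head_max {W : List (Int × Int)} {w : Int × Int} {t : List (Int × Int)}
    (hW : W = w :: t) (hpair : W.Pairwise (fun x y => y.1 ≤ x.1)) :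
    ∀ p ∈ W, p.1 ≤ w.1 := by
  subst hW
  intro p hp
  rcases List.mem_cons.mp hp with rfl | hp
  · exact le_refl _
  · exact (List.pairwise_cons.mp hpair).1 p hp

-- first element (by value-descending stable sort) passing an index test
-- = running max over the passing indices in enumeration order
theorem pv_sorted_max (arr : List Int) (q : Int → Bool) :
    ((PySem.List.sorted ((PySem.List.enumerate arr).map (fun p => (p.2, p.1))) (fun x => -x.1)).find?
        (fun p => q p.2)).map (fun p => p.1)
      = (PySem.List.enumerate arr).foldl
          (fun best p => if q p.1 then pvStep best p.2 else best) none := by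
  set L : List (Int × Int) := PySem.List.enumerate arr with hL
  set L' : List (Int × Int) := L.map (fun p => (p.2, p.1)) with hL'
  set S : List (Int × Int) := PySem.List.sorted L' (fun x => -x.1) with hS
  rw [PySem.List.foldl_if_eq_foldl_filter (p := fun p : Int × Int => q p.1) (f := fun best p => pvStep best p.2)]
  set F : List (Int × Int) := L.filter (fun p => q p.1) with hF
  have hBmap : F.foldl (fun best p => pvStep best p.2) none = (F.map (fun p => p.2)).foldl pvStep none := by
    rw [List.foldl_map]
  set V : List Int := F.map (fun p => p.2) with hV
  rw [hBmap, pv_foldl_step_eq_max?]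
  rw [← List.head?_filter]
  set W : List (Int × Int) := S.filter (fun p => q p.2) with hW
  have hperm : (W.map (fun p => p.1)).Perm V := by
    have h1 : W.Perm (L'.filter (fun p => q p.2)) :=
      (PySem.List.sorted_perm L' (fun x => -x.1) false).filter _
    have h2 : L'.filter (fun p : Int × Int => q p.2) = F.map (fun p => (p.2, p.1)) := by
      rw [hL', List.filter_map, hF]; rfl
    have h3 := h1.map (fun p : Int × Int => p.1)
    rw [h2] at h3
    simpa [hV, Function.comp] using h3
  have hpair : W.Pairwise (fun x y : Int × Int => y.1 ≤ x.1) := by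
    have := (PySem.List.sorted_pairwise L' (fun x => -x.1)).filter (fun p : Int × Int => q p.2)
    exact this.imp (fun h => by omega)
  cases hWc : W with
  | nil =>
    have hVnil : V = [] := by
      have := hperm.length_eq
      rw [hWc] at this
      simpa using (List.length_eq_zero_iff.mp this.symm)
    rw [hVnil]
    simp [PySem.List.max?]
  | cons w t =>
    have hVne : V ≠ [] := by
      intro h
      have := hperm.length_eq
      rw [hWc, h] at this
      simp at this
    obtain ⟨m, hm⟩ : ∃ m, PySem.List.max? V (fun y => y) = some m := by
      rcases ho : PySem.List.max? V (fun y => y) with _ | m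
      · exact absurd ((PySem.List.max?_eq_none_iff V _).mp ho) hVne
      · exact ⟨m, rfl⟩
    rw [hm]
    simp only [List.head?_cons, Option.map_some]
    have hw1V : w.1 ∈ V := hperm.mem_iff.mp (List.mem_map_of_mem (l := W) (by rw [hWc]; exact List.mem_cons_self))
    have hle1 : w.1 ≤ m := PySem.List.max?_isMax hm w.1 hw1V
    have hmW : m ∈ W.map (fun p => p.1) := hperm.mem_iff.mpr (PySem.List.max?_mem hm)
    obtain ⟨p, hpW, hpm⟩ := List.mem_map.mp hmW
    have hle2 : m ≤ w.1 := hpm ▸ pv_head_max hWc hpair p hpW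
    rw [le_antisymm hle1 hle2]

-- when A's check rejects every sector, A returns none
theorem pv_find_none (pred : Int × Int → Bool)
    (h : ∀ p : Int × Int, pred p = false) (l : List (Int × Int)) :
    (l.find? pred).map (fun p : Int × Int => p.1) = none := by
  rw [List.find?_eq_none.mpr (fun x _ => by simp [h x])]
  rfl

-- B's hit test rejects when the circumference is nonpositive
theorem pv_hit_false_nonpos (c aa cnt n k : Int) (h : n * k ≤ 0) :
    pvHit c aa cnt n k = false := by
  simp only [pvHit, Bool.and_eq_false_iff, decide_eq_false_iff_not]
  left
  omega

-- a fold whose condition never fires keeps its accumulator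
theorem pv_foldl_false (cond : Int × Int → Bool) (h : ∀ p, cond p = false)
    (l : List (Int × Int)) :
    l.foldl (fun best p => if cond p then pvStep best p.2 else best) (none : Option Int) = none := by
  induction l with
  | nil => rfl
  | cons x t ih => rw [List.foldl_cons, h x]; simpa using ih

-- A's check with k < 0: the window 0 < x ≤ k is empty
theorem pv_check_false_neg (n j a b k : Int) (hk : k < 0) : pvCheckA n j a b k = false := by
  simp only [pvCheckA, List.any_eq_false]
  intro i _
  simp only [Bool.or_eq_true, decide_eq_true_eq]
  rintro (⟨h1, h2⟩ | ⟨h1, h2⟩) <;> omega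

-- ===== VERDICT (by name: the statement is the Claim_ definition above) =====
theorem max_win_spec : Claim_equal_max_win := by
  intro n arr a b k _ hpre
  unfold Spec_max_win max_win max_win_alt
  by_cases hk : 0 < k
  · by_cases hcnt : PySem.Int.floordiv (b - a) k + 1 ≤ 0
    · rw [if_pos hcnt]
      have hba : b < a := by
        by_contra hcon
        have := (pv_cnt_iff a b k 0 hk).mpr (by omega)
        omega
      exact pv_find_none _ (fun p => by simp [pvCheckA, pv_range_nil_pos a b k hk hba]) _
    · rw [if_neg hcnt]
      have hn : 0 < n := by
        rcases hpre with ⟨hn, _⟩ | ⟨_, hba⟩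
        · exact hn
        · exact absurd ((pv_cnt_iff a b k 0 hk).mp (by omega)) (by omega)
      have hpred : (fun p : Int × Int => pvCheckA n p.2 a b k)
          = fun p : Int × Int =>
              pvHit (k * p.2) a (PySem.Int.floordiv (b - a) k + 1) n k
                || pvHit (k * (n - p.2)) a (PySem.Int.floordiv (b - a) k + 1) n k := by
        funext p
        rw [Bool.eq_iff_iff]
        simp only [pvCheckA, List.any_eq_true, Bool.or_eq_true, decide_eq_true_eq]
        constructor
        · rintro ⟨i, hi, h1 | h2⟩
          · exact Or.inl ((pv_hit_iff a b n k p.2 hk hn).mp ⟨i, hi, h1⟩)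
          · exact Or.inr ((pv_hit_iff a b n k (n - p.2) hk hn).mp ⟨i, hi, h2⟩)
        · rintro (h1 | h2)
          · obtain ⟨i, hi, hwin⟩ := (pv_hit_iff a b n k p.2 hk hn).mpr h1
            exact ⟨i, hi, Or.inl hwin⟩
          · obtain ⟨i, hi, hwin⟩ := (pv_hit_iff a b n k (n - p.2) hk hn).mpr h2
            exact ⟨i, hi, Or.inr hwin⟩
      show ((PySem.List.sorted ((PySem.List.enumerate arr).map (fun p => (p.2, p.1))) (fun x => -x.1)).find?
          (fun p => pvCheckA n p.2 a b k)).map (fun p => p.1) = _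
      rw [hpred]
      exact pv_sorted_max arr (fun j =>
        pvHit (k * j) a (PySem.Int.floordiv (b - a) k + 1) n k
          || pvHit (k * (n - j)) a (PySem.Int.floordiv (b - a) k + 1) n k)
  · -- k < 0 (k = 0 is outside Pre_): A's window is empty and B's residue test fails
    have hkneg : k < 0 := by
      rcases hpre with ⟨_, hk0⟩ | ⟨hkp, _⟩
      · omega
      · omega
    have hn : 0 < n := by
      rcases hpre with ⟨hn, _⟩ | ⟨hkp, _⟩
      · exact hn
      · omega
    have hA : ((PySem.List.sorted ((PySem.List.enumerate arr).map (fun p => (p.2, p.1))) (fun x => -x.1)).find?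
        (fun p => pvCheckA n p.2 a b k)).map (fun p => p.1) = none :=
      pv_find_none _ (fun p => pv_check_false_neg n p.2 a b k hkneg) _
    refine hA.trans ?_
    symm
    show (if PySem.Int.floordiv (b - a) k + 1 ≤ 0 then none
          else (PySem.List.enumerate arr).foldl
            (fun best p =>
              if pvHit (k * p.1) a (PySem.Int.floordiv (b - a) k + 1) n k ||
                 pvHit (k * (n - p.1)) a (PySem.Int.floordiv (b - a) k + 1) n k then pvStep best p.2
              else best) (none : Option Int)) = none
    split_ifs with hcnt
    · rfl
    · have hm : n * k ≤ 0 := by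
        have : n * k < 0 := mul_neg_of_pos_of_neg hn hkneg
        omega
      exact pv_foldl_false _ (fun p => by
        simp [pv_hit_false_nonpos (k * p.1) a _ n k hm,
              pv_hit_false_nonpos (k * (n - p.1)) a _ n k hm]) _
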